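-- pv_equiv track=rewrite | github.com/stubhohm/Pyokemon | GameData/Class_lib/BattleTerminal.py | define_grid
-- ===== SOURCE A (Python) =====
-- def define_grid(input_list:list, columns):
--     grid = []
--     row = []
--     for i, item in enumerate(input_list):
--         row.append(item)
--         if (i + 1) % columns == 0:
--             grid.append(row)
--             row = []
--     if len(row) > 0:
--         grid.append(row)
--     return grid
-- ===== SOURCE B (Python) =====
-- def define_grid(input_list: list, columns):
--     return [input_list[i:i + columns] for i in range(0, len(input_list), columns)]
-- ===== Notes on version B (the rewrite author's own statement) =====
-- stated objective: idiomatic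
-- what changed: B builds the grid with a single slice-based comprehension over strided start indices instead of A's element-by-element accumulation with an enumerate counter, a modulo flush and a trailing partial-row check; the C-level slicing gives a constant-factor speedup.
-- outside the precondition, e.g. on define_grid([1, 2, 3], -2): A returns [[1, 2], [3]], B returns []; on define_grid([], 0): A returns [], B raises ValueError
import Mathlib
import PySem

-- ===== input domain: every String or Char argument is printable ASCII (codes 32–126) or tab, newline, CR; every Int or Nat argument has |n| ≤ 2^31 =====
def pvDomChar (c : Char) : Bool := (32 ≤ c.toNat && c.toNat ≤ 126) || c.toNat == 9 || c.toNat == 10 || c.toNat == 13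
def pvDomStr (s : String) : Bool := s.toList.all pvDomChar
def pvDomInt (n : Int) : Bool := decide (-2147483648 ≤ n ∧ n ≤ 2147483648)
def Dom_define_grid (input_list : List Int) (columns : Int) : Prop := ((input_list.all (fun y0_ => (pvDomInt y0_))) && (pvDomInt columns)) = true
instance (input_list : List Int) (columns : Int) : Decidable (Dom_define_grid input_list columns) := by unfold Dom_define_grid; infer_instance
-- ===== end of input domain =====

-- B replaces A's element-by-element accumulator (enumerate counter, modulo flush, trailing
-- partial-row check) with a single slice comprehension over strided start indices (idiomatic).

-- ===== PORT A =====
-- the 'for i, item in enumerate(input_list)' loop, carrying (grid, row) and the index i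
def defineGridLoop (columns : Int) : Int → List Int → List (List Int) → List Int →
    List (List Int) × List Int
  | _, [], grid, row => (grid, row)
  | i, item :: rest, grid, row =>
      let row' := row ++ [item]
      if PySem.Int.mod (i + 1) columns = 0 then
        defineGridLoop columns (i + 1) rest (grid ++ [row']) []
      else
        defineGridLoop columns (i + 1) rest grid row'

def define_grid (input_list : List Int) (columns : Int) : List (List Int) :=
  let st := defineGridLoop columns 0 input_list [] []
  if st.2.length > 0 then st.1 ++ [st.2] else st.1

-- ===== PORT B =====
def define_grid_alt (input_list : List Int) (columns : Int) : List (List Int) :=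
  (PySem.List.pyRange 0 (input_list.length : Int) columns).map
    (fun i => PySem.List.slice input_list (some i) (some (i + columns)))

-- ===== PRECONDITION & SPEC =====
-- Pre_ excludes columns ≤ 0: with columns = 0 A raises ZeroDivisionError on non-empty input
-- (and B's range raises ValueError), and a negative column count is an unspecified corner with
-- two equally defensible accidental answers — A's modulo test groups into rows of |columns|
-- while B's strided range yields [].
def Pre_define_grid (input_list : List Int) (columns : Int) : Prop := 0 < columns
instance (input_list : List Int) (columns : Int) : Decidable (Pre_define_grid input_list columns) := by
  unfold Pre_define_grid; infer_instance

def pvWitness_define_grid : List Int × Int := ([1, 2, 3, 4, 5], 2)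

def Spec_define_grid (input_list : List Int) (columns : Int) (out : List (List Int)) : Prop :=
  out = define_grid_alt input_list columns
instance (input_list : List Int) (columns : Int) (out : List (List Int)) : Decidable (Spec_define_grid input_list columns out) := by unfold Spec_define_grid; infer_instance

-- ===== CLAIM (what is proved, stated in full; the proofs are below) =====
def Claim_equal_define_grid : Prop := ∀ (input_list : List Int) (columns : Int), Dom_define_grid input_list columns → Pre_define_grid input_list columns → Spec_define_grid input_list columns (define_grid input_list columns)

-- ===== LEMMAS AND PROOFS =====

-- the trailing 'if len(row) > 0' flush of A, as a function (proof helper)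
def finishA (st : List (List Int) × List Int) : List (List Int) :=
  if st.2.length > 0 then st.1 ++ [st.2] else st.1

-- reference chunking: rows of m consecutive elements, last row possibly shorter
def chunksB (m : Nat) : List Int → List (List Int)
  | [] => []
  | x :: xs => (x :: xs.take (m - 1)) :: chunksB m (xs.drop (m - 1))
termination_by l => l.length
decreasing_by exact Nat.lt_succ_of_le (by simpa using List.length_drop_le _ _)

theorem chunksB_nil (m : Nat) : chunksB m [] = [] := by rw [chunksB]

theorem chunksB_cons (m : Nat) (x : Int) (xs : List Int) :
    chunksB m (x :: xs) = (x :: xs.take (m - 1)) :: chunksB m (xs.drop (m - 1)) := by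
  rw [chunksB]

theorem chunksB_unfold (m : Nat) (hm : 0 < m) (l : List Int) (hl : l ≠ []) :
    chunksB m l = l.take m :: chunksB m (l.drop m) := by
  cases l with
  | nil => exact absurd rfl hl
  | cons x xs =>
      rw [chunksB_cons]
      obtain ⟨k, rfl⟩ : ∃ k, m = k + 1 := ⟨m - 1, by omega⟩
      simp

theorem chunksB_full_cons (m : Nat) (hm : 0 < m) (r l : List Int) (hr : r.length = m) :
    chunksB m (r ++ l) = r :: chunksB m l := by
  rw [chunksB_unfold m hm (r ++ l)
    (by intro h
        obtain ⟨h1, -⟩ := List.append_eq_nil_iff.mp h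
        subst h1; simp at hr; omega)]
  rw [← hr, List.take_left, List.drop_left]

theorem chunksB_short (m : Nat) (r : List Int) (hr : r.length < m) (hr0 : r ≠ []) :
    chunksB m r = [r] := by
  cases r with
  | nil => exact absurd rfl hr0
  | cons x xs =>
      have h1 : xs.take (m - 1) = xs := List.take_of_length_le (by simp at hr; omega)
      have h2 : xs.drop (m - 1) = [] := List.drop_eq_nil_of_le (by simp at hr; omega)
      rw [chunksB_cons, h1, h2, chunksB_nil]

-- the A-side loop invariant: with the current row of length n % m, finishing the loop
-- appends exactly the chunks of (row ++ l)
theorem loopA_eq_chunks (m : Nat) (hm : 0 < m) :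
    ∀ (l : List Int) (n : Nat) (grid : List (List Int)) (row : List Int),
      row.length = n % m →
      finishA (defineGridLoop (m : Int) (n : Int) l grid row) = grid ++ chunksB m (row ++ l) := by
  intro l
  induction l with
  | nil =>
      intro n grid row hrow
      simp only [defineGridLoop]
      cases row with
      | nil => simp [finishA, chunksB_nil]
      | cons y ys =>
          have hlt : (y :: ys).length < m := by rw [hrow]; exact Nat.mod_lt _ hm
          simp [finishA, chunksB_short m (y :: ys) hlt (by simp)]
  | cons x xs ih =>
      intro n grid row hrow
      simp only [defineGridLoop]
      have hcast : ((n : Int) + 1) = ((n + 1 : Nat) : Int) := by push_cast; ring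
      rw [hcast, PySem.Int.mod_natCast]
      by_cases h : (n + 1) % m = 0
      · rw [if_pos (by exact_mod_cast h)]
        have hnm : n % m = m - 1 := by
          obtain ⟨q, hq⟩ : ∃ q, n + 1 = m * q := ⟨(n + 1) / m, by
            have := Nat.div_add_mod (n + 1) m; omega⟩
          have hq1 : 1 ≤ q := by
            rcases Nat.eq_zero_or_pos q with h0 | h0
            · subst h0; simp at hq
            · exact h0
          have h5 : m * q = m * (q - 1) + m := by
            have hqq : q = (q - 1) + 1 := by omega
            conv_lhs => rw [hqq]
            ring
          have hn : n = m * (q - 1) + (m - 1) := by omega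
          rw [hn, Nat.mul_add_mod]
          exact Nat.mod_eq_of_lt (by omega)
        have hlen : (row ++ [x]).length = m := by
          simp only [List.length_append, List.length_cons, List.length_nil, hrow, hnm]
          omega
        rw [ih (n + 1) (grid ++ [row ++ [x]]) [] (by simp [h])]
        have hsplit : row ++ x :: xs = (row ++ [x]) ++ xs := by simp
        rw [hsplit, chunksB_full_cons m hm _ _ hlen]
        simp
      · rw [if_neg (by intro hc; exact h (by exact_mod_cast hc))]
        have h2 : (n + 1) % m = (n % m + 1) % m := by
          conv_lhs => rw [← Nat.div_add_mod n m]
          rw [Nat.add_assoc, Nat.mul_add_mod]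
        have h3 : n % m < m := Nat.mod_lt _ hm
        have h4 : (n % m + 1) % m = n % m + 1 := by
          apply Nat.mod_eq_of_lt
          by_contra hc
          have he : n % m + 1 = m := by omega
          rw [he] at h2; simp at h2; exact h h2
        have hlen : (row ++ [x]).length = (n + 1) % m := by
          simp only [List.length_append, List.length_cons, List.length_nil, hrow, h2, h4]
        rw [ih (n + 1) grid (row ++ [x]) hlen]
        simp

-- unfold one step of a positive-step pyRange
theorem pyRange_pos_cons (a b s : Int) (hs : 0 < s) (hab : a < b) :
    PySem.List.pyRange a b s = a :: PySem.List.pyRange (a + s) b s := by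
  rw [PySem.List.pyRange_of_pos a b hs, PySem.List.pyRange_of_pos (a + s) b hs]
  have key : (b - a + s - 1) / s = (b - a - 1) / s + 1 := by
    have h : b - a + s - 1 = (b - a - 1) + 1 * s := by ring
    rw [h, Int.add_mul_ediv_right _ _ (by omega)]
  have hnn : 0 ≤ (b - a - 1) / s := Int.ediv_nonneg (by omega) (by omega)
  rw [if_pos hab, key]
  have ht : ((b - a - 1) / s + 1).toNat = ((b - a - 1) / s).toNat + 1 := by omega
  rw [ht, List.range_succ_eq_map]
  by_cases h2 : a + s < b
  · have key2 : (b - (a + s) + s - 1) / s = (b - a - 1) / s := by ring_nf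
    rw [if_pos h2, key2]
    simp only [List.map_cons, List.map_map, Nat.cast_zero, mul_zero, add_zero]
    congr 1
    apply List.map_congr_left
    intro k _
    simp [Function.comp]
    ring
  · have hz : (b - a - 1) / s = 0 :=
      Int.ediv_eq_zero_of_lt (by omega) (by omega)
    rw [if_neg h2, hz]
    simp

-- the B-side: the strided slice comprehension started at offset a computes the chunks of
-- the suffix from a
theorem mapSlice_eq_chunks (m : Nat) (hm : 0 < m) (l : List Int) (a : Nat) :
    (PySem.List.pyRange (a : Int) (l.length : Int) (m : Int)).map
      (fun i => PySem.List.slice l (some i) (some (i + (m : Int)))) = chunksB m (l.drop a) := by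
  by_cases ha : a < l.length
  · rw [pyRange_pos_cons _ _ _ (by exact_mod_cast hm) (by exact_mod_cast ha)]
    rw [List.map_cons]
    have hcast : ((a : Int) + (m : Int)) = ((a + m : Nat) : Int) := by push_cast; ring
    rw [PySem.List.slice_natCast_add l a m, hcast]
    rw [mapSlice_eq_chunks m hm l (a + m)]
    rw [chunksB_unfold m hm (l.drop a)
      (by apply List.ne_nil_of_length_pos; simp; omega)]
    congr 1
    rw [List.drop_drop]
  · rw [PySem.List.pyRange_of_pos _ _ (by exact_mod_cast hm : (0:Int) < (m:Int))]
    rw [if_neg (by exact_mod_cast ha)]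
    rw [List.drop_eq_nil_of_le (by omega)]
    simp [chunksB_nil]
termination_by l.length - a
decreasing_by omega

-- ===== VERDICT (by name: the statement is the Claim_ definition above) =====
theorem define_grid_spec : Claim_equal_define_grid := by
  intro input_list columns _ hpre
  unfold Spec_define_grid define_grid define_grid_alt
  have hc : 0 < columns := hpre
  obtain ⟨m, hm, rfl⟩ : ∃ m : Nat, 0 < m ∧ columns = (m : Int) :=
    ⟨columns.toNat, by omega, by omega⟩
  have hA := loopA_eq_chunks m hm input_list 0 [] [] (by simp)
  simp only [Nat.cast_zero] at hA
  have hB := mapSlice_eq_chunks m hm input_list 0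
  simp only [Nat.cast_zero, List.drop_zero] at hB
  show finishA (defineGridLoop (m : Int) 0 input_list [] []) = _
  rw [hA, hB]
  simp
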